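-- pv_equiv track=rewrite | github.com/FallThunder/AOC-2023 | day3/Utilities.py | extract_next_number
-- ===== SOURCE A (Python) =====
-- def extract_next_number(input_string, start_position):
--     """
--     Extract the next non-negative integer from the input string starting at the given position.
--
--     Parameters:
--     - input_string (str): The input string containing characters and numbers.
--     - start_position (int): The starting position to begin searching for the next number.
--
--     Returns:
--     - tuple: A tuple containing the extracted non-negative integer and the ending position of the number.
--              If no number is found, returns (None, -1).
--     """
--     length = len(input_string)
--     number = ''
--
--     # Find the starting position of the number
--     while start_position < length and not input_string[start_position].isdigit():
--         start_position += 1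
--
--     # Extract the number
--     while start_position < length and input_string[start_position].isdigit():
--         number += input_string[start_position]
--         start_position += 1
--
--     # Return the result
--     if number:
--         return int(number), start_position
--     else:
--         return None, -1
-- ===== SOURCE B (Python) =====
-- def extract_next_number(input_string, start_position):
--     """One-pass re-implementation: a single scan that accumulates the value
--     arithmetically (no string building, no int())."""
--     n = len(input_string)
--     value = None
--     for pos in range(max(start_position, 0), n):
--         c = input_string[pos]
--         if '0' <= c <= '9':
--             value = (0 if value is None else value * 10) + (ord(c) - 48)
--         elif value is not None:
--             return value, pos
--     return (None, -1) if value is None else (value, n)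
-- ===== Notes on version B (the rewrite author's own statement) =====
-- stated objective: alternative
-- what changed: B replaces A's two while-loops with string concatenation followed by int() by a single state-machine pass that accumulates the number's value arithmetically (value = value*10 + digit) and returns as soon as the run ends.
-- outside the precondition, e.g. on extract_next_number('1234', -2): A returns (341234, 4), B returns (1234, 4); on extract_next_number('7', -3): A raises IndexError, B returns (7, 1)
-- crash fix: For start_position < -len(input_string) A raises IndexError (negative index out of range); B clamps the scan start to 0 and returns normally (e.g. (7, 1) on ('7', -3)). — e.g. on extract_next_number("7", -3): A raises IndexError, B returns (some 7, 1)
import Mathlib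
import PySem

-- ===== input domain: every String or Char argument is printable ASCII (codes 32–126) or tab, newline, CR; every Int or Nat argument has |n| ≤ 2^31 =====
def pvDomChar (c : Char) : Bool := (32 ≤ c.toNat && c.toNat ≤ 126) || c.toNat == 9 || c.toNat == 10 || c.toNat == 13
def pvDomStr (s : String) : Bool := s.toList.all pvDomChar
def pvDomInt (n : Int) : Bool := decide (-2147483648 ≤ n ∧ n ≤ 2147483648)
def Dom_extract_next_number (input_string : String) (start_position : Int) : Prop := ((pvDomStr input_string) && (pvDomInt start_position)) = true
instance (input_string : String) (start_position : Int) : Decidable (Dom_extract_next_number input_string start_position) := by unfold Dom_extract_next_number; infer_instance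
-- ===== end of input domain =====

-- B replaces A's skip-loop + collect-loop (string concatenation, then int()) by one
-- arithmetic state-machine pass; same cost, different structure (objective: alternative).

-- ===== PORT A =====

-- int() applied to a nonempty string of ASCII decimal digits (the only strings A's int()
-- ever sees): exact decimal fold, ported by hand.
def pvA_intOfDigits (cs : List Char) : Int :=
  cs.foldl (fun a c => 10 * a + ((c.toNat : Int) - 48)) 0

-- first while-loop: advance start_position past non-digits
def pvA_skip (l : List Char) (len : Int) (pos : Int) : Int :=
  if pos < len then
    match PySem.List.pyGet? l pos with
    | some c => if PySem.Chars.isdigit c then pos else pvA_skip l len (pos + 1)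
    | none => pos   -- IndexError in Python (only when pos < -len, outside Pre_)
  else pos
termination_by (len - pos).toNat
decreasing_by omega

-- second while-loop: collect the digit run into `number`
def pvA_collect (l : List Char) (len : Int) (pos : Int) (number : List Char) : List Char × Int :=
  if pos < len then
    match PySem.List.pyGet? l pos with
    | some c =>
        if PySem.Chars.isdigit c then pvA_collect l len (pos + 1) (number ++ [c])
        else (number, pos)
    | none => (number, pos)   -- IndexError in Python (outside Pre_)
  else (number, pos)
termination_by (len - pos).toNat
decreasing_by omega

def extract_next_number (input_string : String) (start_position : Int) : Option Int × Int :=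
  let l := input_string.toList
  let length : Int := l.length
  let p := pvA_skip l length start_position
  let r := pvA_collect l length p []
  if r.1.isEmpty then (none, -1) else (some (pvA_intOfDigits r.1), r.2)

-- ===== PORT B =====

-- '0' <= c <= '9' from Source B
def pvDigit (c : Char) : Bool := decide ('0' ≤ c) && decide (c ≤ '9')

-- the single for-loop of Source B, walking the characters from index `pos` on,
-- carrying the arithmetic accumulator `value` (none = no digit seen yet)
def pvB_loop (cs : List Char) (n : Int) (pos : Int) (value : Option Int) : Option Int × Int :=
  match cs with
  | [] =>   -- loop ran out: `return (None, -1) if value is None else (value, n)`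
      match value with
      | some v => (some v, n)
      | none => (none, -1)
  | c :: rest =>
      if pvDigit c then
        pvB_loop rest n (pos + 1)
          (some ((match value with | some v => v * 10 | none => 0) + ((c.toNat : Int) - 48)))
      else
        match value with
        | some v => (some v, pos)   -- `elif value is not None: return value, pos`
        | none => pvB_loop rest n (pos + 1) none

def extract_next_number_alt (input_string : String) (start_position : Int) : Option Int × Int :=
  let l := input_string.toList
  let b : Int := max start_position 0
  pvB_loop (l.drop b.toNat) (l.length : Int) b none

-- ===== PRECONDITION & SPEC =====
-- Pre_ excludes negative start_position, outside the natural domain of a search start: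
-- there A raises IndexError (whenever start_position < -len) or scans through Python's
-- accidental negative-index wraparound, while B clamps the start to 0.
def Pre_extract_next_number (input_string : String) (start_position : Int) : Prop :=
  0 ≤ start_position
instance (input_string : String) (start_position : Int) : Decidable (Pre_extract_next_number input_string start_position) := by unfold Pre_extract_next_number; infer_instance

def pvWitness_extract_next_number : String × Int := ("ab12cd", 0)

-- For start_position < -len(input_string) A raises IndexError (negative index out of
-- range); B clamps the scan start to 0 and returns normally.
def Raises_extract_next_number (input_string : String) (start_position : Int) : Prop :=
  start_position < -(input_string.toList.length : Int)
instance (input_string : String) (start_position : Int) : Decidable (Raises_extract_next_number input_string start_position) := by unfold Raises_extract_next_number; infer_instance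

def pvRaiseWitness_extract_next_number : String × Int := ("7", -3)
def pvRaiseWitnessOut_extract_next_number : Option Int × Int := (some 7, 1)

def Spec_extract_next_number (input_string : String) (start_position : Int) (out : Option Int × Int) : Prop := out = extract_next_number_alt input_string start_position
instance (input_string : String) (start_position : Int) (out : Option Int × Int) : Decidable (Spec_extract_next_number input_string start_position out) := by unfold Spec_extract_next_number; infer_instance

-- ===== CLAIM (what is proved, stated in full; the proofs are below) =====
def Claim_equal_extract_next_number : Prop := ∀ (input_string : String) (start_position : Int), Dom_extract_next_number input_string start_position → Pre_extract_next_number input_string start_position → Spec_extract_next_number input_string start_position (extract_next_number input_string start_position)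

def Claim_raises_extract_next_number : Prop := (∀ (input_string : String) (start_position : Int), Dom_extract_next_number input_string start_position → Raises_extract_next_number input_string start_position → ¬ Pre_extract_next_number input_string start_position) ∧ (Dom_extract_next_number (pvRaiseWitness_extract_next_number.1) (pvRaiseWitness_extract_next_number.2) ∧ Raises_extract_next_number (pvRaiseWitness_extract_next_number.1) (pvRaiseWitness_extract_next_number.2) ∧ extract_next_number_alt (pvRaiseWitness_extract_next_number.1) (pvRaiseWitness_extract_next_number.2) = pvRaiseWitnessOut_extract_next_number)

-- ===== LEMMAS AND PROOFS =====

theorem pvDigit_eq (c : Char) : pvDigit c = PySem.Chars.isdigit c := rfl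

theorem pvA_intOfDigits_snoc (cs : List Char) (c : Char) :
    pvA_intOfDigits (cs ++ [c]) = 10 * pvA_intOfDigits cs + ((c.toNat : Int) - 48) := by
  simp [pvA_intOfDigits]

-- the collected digit string never becomes empty once it is nonempty
theorem pvA_collect_ne_nil (l : List Char) (len : Int) :
    ∀ (pos : Int) (acc : List Char), acc ≠ [] → (pvA_collect l len pos acc).1 ≠ [] := by
  intro pos acc
  induction pos, acc using pvA_collect.induct (l := l) (len := len) with
  | case1 pos acc hlt c hg hd ih =>
      intro _; rw [pvA_collect]; simp only [hlt, if_true, hg, hd]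
      exact ih (by simp)
  | case2 pos acc hlt c hg hd =>
      intro h; rw [pvA_collect]; simp [hlt, hg, hd]; exact h
  | case3 pos acc hlt hg =>
      intro h; rw [pvA_collect]; simp [hlt, hg]; exact h
  | case4 pos acc hlt =>
      intro h; rw [pvA_collect]; simp [hlt]; exact h

-- collect phase vs B's digit-accumulating phase
theorem pv_phase2 (l : List Char) (tl : List Char) (p : Int) (acc : List Char) (hp : 0 ≤ p)
    (hpn : p ≤ (l.length : Int)) (htl : tl = l.drop p.toNat) :
    pvB_loop tl (l.length : Int) p (some (pvA_intOfDigits acc))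
      = (some (pvA_intOfDigits (pvA_collect l (l.length : Int) p acc).1),
         (pvA_collect l (l.length : Int) p acc).2) := by
  induction tl generalizing p acc with
  | nil =>
      have hlen : l.length ≤ p.toNat := by
        by_contra hc
        push_neg at hc
        have := List.drop_eq_getElem_cons hc (l := l)
        rw [this] at htl; exact (List.cons_ne_nil _ _) htl.symm
      have hpe : p = (l.length : Int) := by omega
      rw [pvA_collect]
      simp [pvB_loop, hpe]
  | cons c rest ih =>
      have hlt : p.toNat < l.length := by
        by_contra hc
        push_neg at hc
        rw [List.drop_eq_nil_of_le hc] at htl; exact (List.cons_ne_nil _ _) htl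
      have hdec := List.drop_eq_getElem_cons hlt (l := l)
      rw [hdec] at htl
      have hc : c = l[p.toNat] := by injection htl
      have hrest : rest = l.drop (p.toNat + 1) := by injection htl
      have hplt : p < (l.length : Int) := by omega
      have hget : PySem.List.pyGet? l p = some l[p.toNat] :=
        PySem.List.pyGet?_eq_some_getElem l (by omega) (by omega)
      have htn : (p + 1).toNat = p.toNat + 1 := by omega
      rw [pvA_collect]
      simp only [hplt, if_pos, hget]
      by_cases hd : PySem.Chars.isdigit l[p.toNat]
      · simp only [hd, if_true, pvB_loop, hc, pvDigit_eq, hd, if_true]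
        have : (match some (pvA_intOfDigits acc) with
                  | some v => v * 10
                  | none => 0) + ((l[p.toNat].toNat : Int) - 48)
              = pvA_intOfDigits (acc ++ [l[p.toNat]]) := by
          rw [pvA_intOfDigits_snoc]; ring
        rw [this]
        exact ih (p + 1) (acc ++ [l[p.toNat]]) (by omega) (by omega) (by rw [htn]; exact hrest)
      · simp only [hd, if_false, pvB_loop, hc, pvDigit_eq]
        simp

-- skip phase: A's full pipeline equals B's loop started with value = none
theorem pv_phase1 (l : List Char) (tl : List Char) (p : Int) (hp : 0 ≤ p)
    (htl : tl = l.drop p.toNat) :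
    (let q := pvA_skip l (l.length : Int) p
     let r := pvA_collect l (l.length : Int) q []
     if r.1.isEmpty then ((none : Option Int), (-1 : Int))
     else (some (pvA_intOfDigits r.1), r.2))
      = pvB_loop tl (l.length : Int) p none := by
  induction tl generalizing p with
  | nil =>
      have hlen : l.length ≤ p.toNat := by
        by_contra hc
        push_neg at hc
        have := List.drop_eq_getElem_cons hc (l := l)
        rw [this] at htl; exact (List.cons_ne_nil _ _) htl.symm
      have hnlt : ¬ p < (l.length : Int) := by omega
      rw [pvA_skip]
      simp only [hnlt, if_false]
      rw [pvA_collect]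
      simp [pvB_loop, hnlt]
  | cons c rest ih =>
      have hlt : p.toNat < l.length := by
        by_contra hc
        push_neg at hc
        rw [List.drop_eq_nil_of_le hc] at htl; exact (List.cons_ne_nil _ _) htl
      have hdec := List.drop_eq_getElem_cons hlt (l := l)
      rw [hdec] at htl
      have hc : c = l[p.toNat] := by injection htl
      have hrest : rest = l.drop (p.toNat + 1) := by injection htl
      have hplt : p < (l.length : Int) := by omega
      have hget : PySem.List.pyGet? l p = some l[p.toNat] :=
        PySem.List.pyGet?_eq_some_getElem l (by omega) (by omega)
      have htn : (p + 1).toNat = p.toNat + 1 := by omega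
      rw [pvA_skip]
      simp only [hplt, if_pos, hget]
      by_cases hd : PySem.Chars.isdigit l[p.toNat]
      · -- digit found: skip stops, collect takes over; B switches to some-accumulator
        simp only [hd, if_true, pvB_loop, hc, pvDigit_eq, hd, if_true]
        rw [pvA_collect]
        simp only [hplt, if_pos, hget, hd, if_true]
        have hne := pvA_collect_ne_nil l (l.length : Int) (p + 1) [l[p.toNat]] (by simp)
        have hstep : (match (none : Option Int) with
                        | some v => v * 10
                        | none => 0) + ((l[p.toNat].toNat : Int) - 48)
                    = pvA_intOfDigits [l[p.toNat]] := by
          simp [pvA_intOfDigits]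
        rw [hstep,
          pv_phase2 l rest (p + 1) [l[p.toNat]] (by omega) (by omega)
            (by rw [htn]; exact hrest)]
        simp [List.isEmpty_iff, hne]
      · simp only [hd, if_false, pvB_loop, hc, pvDigit_eq, hd, if_false]
        exact ih (p + 1) (by omega) (by rw [htn]; exact hrest)

-- ===== VERDICT (by name: the statement is the Claim_ definition above) =====
theorem extract_next_number_spec : Claim_equal_extract_next_number := by
  intro s start _dom hpre
  unfold Spec_extract_next_number extract_next_number extract_next_number_alt
  have hmax : max start 0 = start := by
    unfold Pre_extract_next_number at hpre; omega
  rw [hmax]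
  exact pv_phase1 s.toList (s.toList.drop start.toNat) start
    (by unfold Pre_extract_next_number at hpre; exact hpre) rfl

@[simp] theorem extract_next_number_raises : Claim_raises_extract_next_number := by
  unfold Claim_raises_extract_next_number
  constructor
  · intro s start _dom hr hpre
    unfold Raises_extract_next_number at hr
    unfold Pre_extract_next_number at hpre
    omega
  · exact ⟨by decide, by decide, by decide⟩
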